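-- pv_equiv track=rewrite | github.com/Coaspe/Algorithm | PS/Binary search/1182. Shortest Distance to Target Color/Solution.py | shortestDistanceColor
-- ===== SOURCE A (Python) =====
-- from typing import List
-- import collections
-- import bisect
--
-- def shortestDistanceColor(colors: List[int], queries: List[List[int]]) -> List[int]:
--     hashmap = collections.defaultdict(list)
--     answer = []
--     for i, c in enumerate(colors):
--         hashmap[c].append(i)
--
--     for i, c in queries:
--         if c not in hashmap:
--             answer.append(-1)
--             continue
--
--         insert = bisect.bisect_left(hashmap[c], i)
--         left = abs(hashmap[c][max(insert-1, 0)] - i)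
--         right = abs(hashmap[c][min(insert, len(hashmap[c])-1)] - i)
--         answer.append(min(left, right))
--
--     return answer
-- ===== SOURCE B (Python) =====
-- from typing import List
--
-- def shortestDistanceColor(colors: List[int], queries: List[List[int]]) -> List[int]:
--     answer = []
--     for i, c in queries:
--         best = None
--         for j, col in enumerate(colors):
--             if col == c:
--                 d = abs(j - i)
--                 if best is None or d < best:
--                     best = d
--         answer.append(-1 if best is None else best)
--     return answer
-- ===== Notes on version B (the rewrite author's own statement) =====
-- stated objective: simpler
-- what changed: Replaces the hashmap of per-color sorted index lists plus per-query binary search by a direct per-query linear scan over enumerate(colors) that keeps the running minimum |j - i| (no hashmap, no bisect).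
import Mathlib
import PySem

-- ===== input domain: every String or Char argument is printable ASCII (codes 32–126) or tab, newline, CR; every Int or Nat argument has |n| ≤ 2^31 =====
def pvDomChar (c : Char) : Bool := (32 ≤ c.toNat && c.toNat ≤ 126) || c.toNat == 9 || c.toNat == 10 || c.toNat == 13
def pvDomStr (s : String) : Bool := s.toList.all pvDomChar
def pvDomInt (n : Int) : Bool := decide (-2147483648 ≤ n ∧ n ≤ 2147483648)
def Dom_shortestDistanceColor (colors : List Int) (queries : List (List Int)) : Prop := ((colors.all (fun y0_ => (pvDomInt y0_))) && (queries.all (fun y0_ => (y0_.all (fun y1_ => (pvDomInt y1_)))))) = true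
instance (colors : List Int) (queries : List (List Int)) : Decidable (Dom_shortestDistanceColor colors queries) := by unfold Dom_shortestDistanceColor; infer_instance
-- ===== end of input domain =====

-- ===== PORT A =====
-- B replaces the hashmap + per-query bisect by a per-query linear scan keeping the running min distance (simpler; not faster).

-- abs(x) (Python's abs on int)
def pyAbs (x : Int) : Int := if x < 0 then -x else x

def shortestDistanceColor (colors : List Int) (queries : List (List Int)) : List Int :=
  -- hashmap = defaultdict(list); for i, c in enumerate(colors): hashmap[c].append(i)
  let hm : PySem.Dict Int (List Int) :=
    (PySem.List.enumerate colors).foldl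
      (fun d p => d.modify p.2 [] (fun l => l ++ [p.1])) PySem.Dict.empty
  -- for i, c in queries: …  (queries that are not pairs raise ValueError in Python; excluded by Pre_)
  queries.foldl
    (fun answer q =>
      match q with
      | [i, c] =>
        if hm.contains c = false then answer ++ [-1]
        else
          let occ := hm.getD c []
          let ins : Int := (PySem.List.bisectLeft occ i : Int)
          -- indices max(ins-1,0) / min(ins, len-1) are in range (occ nonempty), so the default 0 of pyGetD is unreachable
          let left := pyAbs (PySem.List.pyGetD occ (max (ins - 1) 0) 0 - i)
          let right := pyAbs (PySem.List.pyGetD occ (min ins ((occ.length : Int) - 1)) 0 - i)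
          answer ++ [min left right]
      | _ => answer)
    []

-- ===== PORT B =====
-- abs(x) for B (kept separate from A's helper)
def pyAbsB (x : Int) : Int := if x < 0 then -x else x

-- if best is None or d < best: best = d   (one step of B's running minimum)
def updBest (best : Option Int) (d : Int) : Option Int :=
  match best with
  | none => some d
  | some b => if d < b then some d else some b

-- -1 if best is None else best
def bestOr (best : Option Int) : Int :=
  match best with
  | none => -1
  | some b => b

def shortestDistanceColor_alt (colors : List Int) (queries : List (List Int)) : List Int :=
  -- 'for i, c in queries': tuple unpacking succeeds exactly on length-2 lists (others raise, excluded by Pre_);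
  -- ported by an explicit length test and positional reads, exact on that domain
  queries.foldl
    (fun answer q =>
      if q.length == 2 then
        let i := PySem.List.pyGetD q 0 0
        let c := PySem.List.pyGetD q 1 0
        let best : Option Int :=
          (PySem.List.enumerate colors).foldl
            (fun best p => if p.2 == c then updBest best (pyAbsB (p.1 - i)) else best)
            none
        answer ++ [bestOr best]
      else answer)
    []

-- ===== PRECONDITION & SPEC =====
-- Pre_ excludes queries that are not [i, c] pairs: Python A raises ValueError unpacking them.
def Pre_shortestDistanceColor (colors : List Int) (queries : List (List Int)) : Prop :=
  ∀ q ∈ queries, q.length = 2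
instance (colors : List Int) (queries : List (List Int)) : Decidable (Pre_shortestDistanceColor colors queries) := by unfold Pre_shortestDistanceColor; infer_instance

def pvWitness_shortestDistanceColor : List Int × List (List Int) :=
  ([1, 1, 2, 1, 3], [[1, 3], [2, 2], [6, 1], [0, 5]])

def Spec_shortestDistanceColor (colors : List Int) (queries : List (List Int)) (out : List Int) : Prop := out = shortestDistanceColor_alt colors queries
instance (colors : List Int) (queries : List (List Int)) (out : List Int) : Decidable (Spec_shortestDistanceColor colors queries out) := by unfold Spec_shortestDistanceColor; infer_instance

-- ===== CLAIM (what is proved, stated in full; the proofs are below) =====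
def Claim_equal_shortestDistanceColor : Prop := ∀ (colors : List Int) (queries : List (List Int)), Dom_shortestDistanceColor colors queries → Pre_shortestDistanceColor colors queries → Spec_shortestDistanceColor colors queries (shortestDistanceColor colors queries)

-- ===== LEMMAS AND PROOFS =====

-- the sorted list of positions of colour c, as both programs effectively use it
def occOf (colors : List Int) (c : Int) : List Int :=
  ((PySem.List.enumerate colors).filter (fun p => p.2 == c)).map (fun p => p.1)

theorem enumerate_snd (colors : List Int) (k : Int) :
    (PySem.List.enumerate colors k).map (fun p => p.2) = colors := by
  induction colors generalizing k with
  | nil => rfl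
  | cons x t ih => simp [PySem.List.enumerate, ih]

theorem enumerate_fst_lb (colors : List Int) (k : Int) :
    ∀ p ∈ PySem.List.enumerate colors k, k ≤ p.1 := by
  induction colors generalizing k with
  | nil => simp [PySem.List.enumerate]
  | cons x t ih =>
    intro p hp
    simp only [PySem.List.enumerate, List.mem_cons] at hp
    rcases hp with h | h
    · simp [h]
    · have := ih (k + 1) p h; omega

theorem enumerate_pairwise (colors : List Int) (k : Int) :
    (PySem.List.enumerate colors k).Pairwise (fun p q => p.1 < q.1) := by
  induction colors generalizing k with
  | nil => simp [PySem.List.enumerate]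
  | cons x t ih =>
    simp only [PySem.List.enumerate]
    refine List.Pairwise.cons ?_ (ih (k + 1))
    intro p hp
    have := enumerate_fst_lb t (k + 1) p hp
    omega

theorem occOf_sorted (colors : List Int) (c : Int) :
    (occOf colors c).Pairwise (· < ·) := by
  unfold occOf
  rw [List.pairwise_map]
  exact (enumerate_pairwise colors 0).filter _



theorem hm_getD (colors : List Int) (c : Int) :
    ((PySem.List.enumerate colors).foldl
      (fun d p => d.modify p.2 [] (fun l => l ++ [p.1])) PySem.Dict.empty).getD c []
    = occOf colors c := by
  have h := PySem.Dict.getD_foldl_modify_append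
      ((PySem.List.enumerate colors).map (fun p => (p.2, p.1))) PySem.Dict.empty c
  rw [List.foldl_map] at h
  simpa [occOf, List.filter_map, Function.comp] using h

theorem hm_contains (colors : List Int) (c : Int) :
    ((PySem.List.enumerate colors).foldl
      (fun d p => d.modify p.2 [] (fun l => l ++ [p.1])) PySem.Dict.empty).contains c = true
    ↔ c ∈ colors := by
  rw [PySem.Dict.contains_iff_mem_keys]
  rw [PySem.Dict.keys_foldl_modify_key (PySem.List.enumerate colors) (fun p => p.2) []
      (fun _ p l => l ++ [p.1]) PySem.Dict.empty]
  rw [enumerate_snd]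
  show c ∈ PySem.Set.update PySem.Set.empty colors ↔ c ∈ colors
  have h : PySem.Set.update PySem.Set.empty colors = PySem.Set.ofList colors := rfl
  rw [h, PySem.Set.mem_ofList]

theorem mem_iff_occOf_ne_nil (colors : List Int) (c : Int) :
    c ∈ colors ↔ occOf colors c ≠ [] := by
  conv_lhs => rw [← enumerate_snd colors 0]
  simp only [occOf, ne_eq, List.map_eq_nil_iff, List.filter_eq_nil_iff, List.mem_map]
  constructor
  · rintro ⟨p, hp, hpc⟩ h
    exact absurd (by simpa using hpc) (by simpa using h p hp)
  · intro h
    by_contra hno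
    push_neg at hno
    exact h (fun p hp => by simpa using hno p hp)

theorem pyAbs_eq (x : Int) : pyAbs x = |x| := by
  unfold pyAbs
  rcases lt_or_ge x 0 with h | h
  · rw [abs_of_neg h]; simp [h]
  · rw [abs_of_nonneg h]; simp [not_lt.mpr h]

-- the running-min loop of B, as a plain foldl min over the distance list
theorem foldl_min_step (i : Int) (t : List Int) (a : Int) :
    t.foldl (fun b j => updBest b (pyAbs (j - i))) (some a)
    = some ((t.map (fun j => pyAbs (j - i))).foldl min a) := by
  induction t generalizing a with
  | nil => rfl
  | cons j t ih =>
    simp only [List.foldl_cons, List.map_cons]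
    have h : updBest (some a) (pyAbs (j - i)) = some (min a (pyAbs (j - i))) := by
      show (if pyAbs (j - i) < a then some (pyAbs (j - i)) else some a) = _
      split_ifs with h <;> (congr 1; omega)
    rw [h, ih]

-- A's two-neighbour formula attains the minimum distance to an element of a sorted occ
theorem A_formula_min (occ : List Int) (i : Int) (hs : occ.Pairwise (· < ·)) (hne : occ ≠ []) :
    (∀ j ∈ occ, min (pyAbs (PySem.List.pyGetD occ (max (↑(PySem.List.bisectLeft occ i) - 1) 0) 0 - i))
        (pyAbs (PySem.List.pyGetD occ (min ↑(PySem.List.bisectLeft occ i) ((occ.length : Int) - 1)) 0 - i))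
      ≤ pyAbs (j - i))
    ∧ (∃ j ∈ occ, min (pyAbs (PySem.List.pyGetD occ (max (↑(PySem.List.bisectLeft occ i) - 1) 0) 0 - i))
        (pyAbs (PySem.List.pyGetD occ (min ↑(PySem.List.bisectLeft occ i) ((occ.length : Int) - 1)) 0 - i))
      = pyAbs (j - i)) := by
  have hlen : 0 < occ.length := List.length_pos_iff.mpr hne
  have hsle : occ.Pairwise (· ≤ ·) := hs.imp (fun h => le_of_lt h)
  obtain ⟨hins_le, hlt, hge⟩ := PySem.List.bisectLeft_spec occ i hsle
  set ins := PySem.List.bisectLeft occ i with hins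
  have hmono : ∀ (p q : Nat) (hp : p < occ.length) (hq : q < occ.length), p ≤ q → occ[p] ≤ occ[q] := by
    intro p q hp hq hpq
    rcases Nat.lt_or_ge p q with h | h
    · exact le_of_lt (List.pairwise_iff_getElem.mp hs p q hp hq h)
    · have heq : p = q := le_antisymm hpq h
      subst heq; exact le_refl _
  set kL : Nat := ins - 1 with hkL
  set kR : Nat := min ins (occ.length - 1) with hkR
  have hkLlt : kL < occ.length := by omega
  have hkRlt : kR < occ.length := by omega
  have hcastL : (max (↑ins - 1) 0 : Int) = ((kL : Nat) : Int) := by omega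
  have hcastR : (min (↑ins : Int) ((occ.length : Int) - 1)) = ((kR : Nat) : Int) := by omega
  have hL : PySem.List.pyGetD occ (max (↑ins - 1) 0) 0 = occ[kL] := by
    rw [hcastL, PySem.List.pyGetD_natCast, List.getD_eq_getElem _ _ hkLlt]
  have hR : PySem.List.pyGetD occ (min ↑ins ((occ.length : Int) - 1)) 0 = occ[kR] := by
    rw [hcastR, PySem.List.pyGetD_natCast, List.getD_eq_getElem _ _ hkRlt]
  rw [hL, hR]
  constructor
  · intro j hj
    obtain ⟨p, hp, hpj⟩ := List.mem_iff_getElem.mp hj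
    rcases lt_or_ge j i with hji | hji
    · -- j < i : j lies strictly left of the insertion point
      have hpins : p < ins := by
        by_contra h
        push_neg at h
        have := hge p hp h
        omega
      have h1 : occ[p] ≤ occ[kL] := hmono p kL hp hkLlt (by omega)
      have h2 : occ[kL] < i := hlt kL hkLlt (by omega)
      have hfin : pyAbs (occ[kL] - i) ≤ pyAbs (j - i) := by
        rw [pyAbs_eq, pyAbs_eq, abs_of_nonpos (by omega), abs_of_nonpos (by omega)]
        omega
      exact le_trans (min_le_left _ _) hfin
    · -- i ≤ j : j lies at or right of the insertion point
      have hpins : ins ≤ p := by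
        by_contra h
        push_neg at h
        have := hlt p hp h
        omega
      have hkReq : kR = ins := by omega
      have h1 : occ[kR] ≤ occ[p] := hmono kR p hkRlt hp (by omega)
      have h2 : i ≤ occ[kR] := hge kR hkRlt (by omega)
      have hfin : pyAbs (occ[kR] - i) ≤ pyAbs (j - i) := by
        rw [pyAbs_eq, pyAbs_eq, abs_of_nonneg (by omega), abs_of_nonneg (by omega)]
        omega
      exact le_trans (min_le_right _ _) hfin
  · rcases le_total (pyAbs (occ[kL] - i)) (pyAbs (occ[kR] - i)) with h | h
    · exact ⟨occ[kL], List.getElem_mem hkLlt, by omega⟩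
    · exact ⟨occ[kR], List.getElem_mem hkRlt, by omega⟩

-- the B-side running minimum satisfies the same two properties
theorem B_fold_min (i x : Int) (t : List Int) :
    (∀ j ∈ x :: t, (t.map (fun j => pyAbs (j - i))).foldl min (pyAbs (x - i)) ≤ pyAbs (j - i))
    ∧ (∃ j ∈ x :: t, (t.map (fun j => pyAbs (j - i))).foldl min (pyAbs (x - i)) = pyAbs (j - i)) := by
  obtain ⟨h1, h2⟩ := PySem.List.foldl_min_le (t.map (fun j => pyAbs (j - i))) (pyAbs (x - i))
  constructor
  · intro j hj
    rcases List.mem_cons.mp hj with h | h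
    · subst h; exact h1
    · exact h2 _ (List.mem_map_of_mem h)
  · rcases PySem.List.foldl_min_mem (t.map (fun j => pyAbs (j - i))) (pyAbs (x - i)) with h | h
    · exact ⟨x, List.mem_cons_self, h⟩
    · obtain ⟨j, hj, hje⟩ := List.mem_map.mp h
      exact ⟨j, List.mem_cons_of_mem _ hj, hje.symm⟩

-- per-query equality of the two appended values
theorem perQuery (colors : List Int) (i c : Int) :
    (if ((PySem.List.enumerate colors).foldl
          (fun d p => d.modify p.2 [] (fun l => l ++ [p.1])) PySem.Dict.empty).contains c = false
      then (-1 : Int)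
      else
        min (pyAbs (PySem.List.pyGetD
              (((PySem.List.enumerate colors).foldl
                (fun d p => d.modify p.2 [] (fun l => l ++ [p.1])) PySem.Dict.empty).getD c [])
              (max (↑(PySem.List.bisectLeft
                (((PySem.List.enumerate colors).foldl
                  (fun d p => d.modify p.2 [] (fun l => l ++ [p.1])) PySem.Dict.empty).getD c []) i) - 1) 0) 0 - i))
          (pyAbs (PySem.List.pyGetD
              (((PySem.List.enumerate colors).foldl
                (fun d p => d.modify p.2 [] (fun l => l ++ [p.1])) PySem.Dict.empty).getD c [])
              (min (↑(PySem.List.bisectLeft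
                (((PySem.List.enumerate colors).foldl
                  (fun d p => d.modify p.2 [] (fun l => l ++ [p.1])) PySem.Dict.empty).getD c []) i))
                ((((((PySem.List.enumerate colors).foldl
                  (fun d p => d.modify p.2 [] (fun l => l ++ [p.1])) PySem.Dict.empty).getD c []).length : Int)) - 1)) 0 - i)))
    = bestOr ((PySem.List.enumerate colors).foldl
        (fun best p => if p.2 == c then updBest best (pyAbsB (p.1 - i)) else best) none) := by
  rw [show pyAbsB = pyAbs from rfl]
  have hsplit : (PySem.List.enumerate colors).foldl
        (fun best p => if p.2 == c then updBest best (pyAbs (p.1 - i)) else best) none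
      = ((PySem.List.enumerate colors).filter (fun p => p.2 == c)).foldl
        (fun best p => updBest best (pyAbs (p.1 - i))) none :=
    PySem.List.foldl_if_eq_foldl_filter (fun (p : Int × Int) => p.2 == c)
      (fun (best : Option Int) (p : Int × Int) => updBest best (pyAbs (p.1 - i))) _ _
  rw [hsplit]
  rw [show ((PySem.List.enumerate colors).filter (fun p => p.2 == c)).foldl
        (fun best p => updBest best (pyAbs (p.1 - i))) none
      = (occOf colors c).foldl (fun best j => updBest best (pyAbs (j - i))) none
      from (List.foldl_map (f := fun p : Int × Int => p.1)
        (g := fun (b : Option Int) (j : Int) => updBest b (pyAbs (j - i)))).symm]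
  rw [hm_getD]
  by_cases hc : c ∈ colors
  · have hcont := (hm_contains colors c).mpr hc
    rw [hcont, if_neg (by simp)]
    have hne : occOf colors c ≠ [] := (mem_iff_occOf_ne_nil colors c).mp hc
    obtain ⟨x, t, hxt⟩ := List.exists_cons_of_ne_nil hne
    rw [hxt, List.foldl_cons]
    have hupd : updBest none (pyAbs (x - i)) = some (pyAbs (x - i)) := rfl
    rw [hupd, foldl_min_step]
    have hA := A_formula_min (x :: t) i (hxt ▸ occOf_sorted colors c) (List.cons_ne_nil x t)
    have hB := B_fold_min i x t
    obtain ⟨j1, hj1, he1⟩ := hA.2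
    obtain ⟨j2, hj2, he2⟩ := hB.2
    show _ = bestOr (some _)
    unfold bestOr
    exact le_antisymm (by rw [he2]; exact hA.1 j2 hj2) (by rw [he1]; exact hB.1 j1 hj1)
  · have hcont : ((PySem.List.enumerate colors).foldl
        (fun d p => d.modify p.2 [] (fun l => l ++ [p.1])) PySem.Dict.empty).contains c = false := by
      rcases Bool.eq_false_or_eq_true (((PySem.List.enumerate colors).foldl
        (fun d p => d.modify p.2 [] (fun l => l ++ [p.1])) PySem.Dict.empty).contains c) with h | h
      · exact absurd ((hm_contains colors c).mp h) hc
      · exact h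
    rw [hcont]
    have hnil : occOf colors c = [] := by
      by_contra h
      exact hc ((mem_iff_occOf_ne_nil colors c).mpr h)
    rw [hnil]
    rfl

-- ===== VERDICT (by name: the statement is the Claim_ definition above) =====
theorem shortestDistanceColor_spec : Claim_equal_shortestDistanceColor := by
  intro colors queries _hdom hpre
  unfold Spec_shortestDistanceColor shortestDistanceColor shortestDistanceColor_alt
  apply PySem.List.foldl_congr_mem
  intro acc q hq
  have hlen := hpre q hq
  rcases q with _ | ⟨i, _ | ⟨c, _ | ⟨z, r⟩⟩⟩
  · simp at hlen
  · simp at hlen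
  · have hi : PySem.List.pyGetD [i, c] 0 0 = i := rfl
    have hc : PySem.List.pyGetD [i, c] 1 0 = c := rfl
    dsimp only
    rw [hi, hc]
    rw [← apply_ite (fun v : Int => acc ++ [v])]
    rw [perQuery colors i c]
    rfl
  · simp at hlen
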